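-- pv_equiv track=rewrite | github.com/sheldcoop/UPSTOX-PROJECT | backend/data/fetchers/corporate_announcements.py | _classify_nse_announcement
-- ===== SOURCE A (Python) =====
-- def _classify_nse_announcement(description: str) -> str:
--     """
--     Classify NSE announcement based on description.
--
--     Args:
--         description: Announcement description
--
--     Returns:
--         Announcement type
--     """
--     desc_lower = description.lower()
--
--     if any(
--         word in desc_lower
--         for word in ["dividend", "interim dividend", "final dividend"]
--     ):
--         return "DIVIDEND"
--     elif any(
--         word in desc_lower for word in ["split", "stock split", "sub-division"]
--     ):
--         return "STOCK_SPLIT"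
--     elif any(word in desc_lower for word in ["bonus", "bonus issue"]):
--         return "BONUS"
--     elif any(word in desc_lower for word in ["rights", "rights issue"]):
--         return "RIGHTS"
--     elif any(word in desc_lower for word in ["buyback", "buy-back", "buy back"]):
--         return "BUYBACK"
--     elif any(word in desc_lower for word in ["board meeting", "meeting of board"]):
--         return "BOARD_MEETING"
--     elif any(
--         word in desc_lower
--         for word in ["result", "quarterly", "annual", "financial"]
--     ):
--         return "EARNINGS"
--     elif any(word in desc_lower for word in ["agm", "annual general meeting"]):
--         return "AGM"
--     elif any(
--         word in desc_lower for word in ["egm", "extraordinary general meeting"]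
--     ):
--         return "EGM"
--     elif any(
--         word in desc_lower for word in ["merger", "acquisition", "amalgamation"]
--     ):
--         return "M&A"
--     else:
--         return "OTHER"
-- ===== SOURCE B (Python) =====
-- _LABELS = [
--     ("DIVIDEND", ["dividend", "interim dividend", "final dividend"]),
--     ("STOCK_SPLIT", ["split", "stock split", "sub-division"]),
--     ("BONUS", ["bonus", "bonus issue"]),
--     ("RIGHTS", ["rights", "rights issue"]),
--     ("BUYBACK", ["buyback", "buy-back", "buy back"]),
--     ("BOARD_MEETING", ["board meeting", "meeting of board"]),
--     ("EARNINGS", ["result", "quarterly", "annual", "financial"]),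
--     ("AGM", ["agm", "annual general meeting"]),
--     ("EGM", ["egm", "extraordinary general meeting"]),
--     ("M&A", ["merger", "acquisition", "amalgamation"]),
-- ]
--
-- # Flat keyword table: each keyword tagged with the priority of its group.
-- _KEYWORDS = [(kw, prio) for prio, (_label, kws) in enumerate(_LABELS) for kw in kws]
--
--
-- def _classify_nse_announcement(description: str) -> str:
--     desc_lower = description.lower()
--     matched = [prio for kw, prio in _KEYWORDS if kw in desc_lower]
--     return _LABELS[min(matched)][0] if matched else "OTHER"
-- ===== Notes on version B (the rewrite author's own statement) =====
-- stated objective: alternative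
-- what changed: Instead of an ordered first-match if-elif chain, B flattens all keywords into one priority-tagged table, collects the priorities of ALL matching keywords in a single comprehension, and aggregates with min() to index the label table ('OTHER' if nothing matched).
import Mathlib
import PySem

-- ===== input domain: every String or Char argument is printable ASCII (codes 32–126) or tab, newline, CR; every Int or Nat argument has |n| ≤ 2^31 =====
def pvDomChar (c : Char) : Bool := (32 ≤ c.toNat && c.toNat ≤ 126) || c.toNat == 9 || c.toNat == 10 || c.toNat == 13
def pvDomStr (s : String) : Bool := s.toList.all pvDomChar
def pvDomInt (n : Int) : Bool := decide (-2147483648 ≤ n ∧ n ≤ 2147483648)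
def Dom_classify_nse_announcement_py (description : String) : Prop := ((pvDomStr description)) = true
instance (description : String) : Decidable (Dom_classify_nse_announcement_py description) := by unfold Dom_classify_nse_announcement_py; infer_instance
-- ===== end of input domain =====

-- B replaces A's ordered if-elif first-match chain by a flat priority-tagged keyword
-- table: it collects the priorities of ALL matching keywords and takes the minimum.

-- ===== PORT A =====
-- Literal transliteration of A's if-elif chain.
def classify_nse_announcement_py (description : String) : String :=
  let desc_lower := PySem.Str.lower description
  if ["dividend", "interim dividend", "final dividend"].any
      (fun word => PySem.Str.isIn word desc_lower) then "DIVIDEND"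
  else if ["split", "stock split", "sub-division"].any
      (fun word => PySem.Str.isIn word desc_lower) then "STOCK_SPLIT"
  else if ["bonus", "bonus issue"].any
      (fun word => PySem.Str.isIn word desc_lower) then "BONUS"
  else if ["rights", "rights issue"].any
      (fun word => PySem.Str.isIn word desc_lower) then "RIGHTS"
  else if ["buyback", "buy-back", "buy back"].any
      (fun word => PySem.Str.isIn word desc_lower) then "BUYBACK"
  else if ["board meeting", "meeting of board"].any
      (fun word => PySem.Str.isIn word desc_lower) then "BOARD_MEETING"
  else if ["result", "quarterly", "annual", "financial"].any
      (fun word => PySem.Str.isIn word desc_lower) then "EARNINGS"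
  else if ["agm", "annual general meeting"].any
      (fun word => PySem.Str.isIn word desc_lower) then "AGM"
  else if ["egm", "extraordinary general meeting"].any
      (fun word => PySem.Str.isIn word desc_lower) then "EGM"
  else if ["merger", "acquisition", "amalgamation"].any
      (fun word => PySem.Str.isIn word desc_lower) then "M&A"
  else "OTHER"

-- ===== PORT B =====
-- B (Source B): flat keyword table tagged with group priority; gather priorities of all
-- matching keywords, min-aggregate, index the label table.
def pvLabels : List (String × List String) :=
  [("DIVIDEND", ["dividend", "interim dividend", "final dividend"]),
   ("STOCK_SPLIT", ["split", "stock split", "sub-division"]),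
   ("BONUS", ["bonus", "bonus issue"]),
   ("RIGHTS", ["rights", "rights issue"]),
   ("BUYBACK", ["buyback", "buy-back", "buy back"]),
   ("BOARD_MEETING", ["board meeting", "meeting of board"]),
   ("EARNINGS", ["result", "quarterly", "annual", "financial"]),
   ("AGM", ["agm", "annual general meeting"]),
   ("EGM", ["egm", "extraordinary general meeting"]),
   ("M&A", ["merger", "acquisition", "amalgamation"])]

def pvKeywords : List (String × Int) :=
  (PySem.List.enumerate pvLabels 0).flatMap (fun pr => pr.2.2.map (fun kw => (kw, pr.1)))

def classify_nse_announcement_py_alt (description : String) : String :=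
  let desc_lower := PySem.Str.lower description
  let matched := (pvKeywords.filter (fun t => PySem.Str.isIn t.1 desc_lower)).map (fun t => t.2)
  match PySem.List.min? matched (fun x => x) with
  | some m =>
      -- _LABELS[min(matched)][0]; the 'none' branch is unreachable (min is a table index)
      match PySem.List.pyGet? pvLabels m with
      | some pr => pr.1
      | none => "OTHER"
  | none => "OTHER"

-- ===== PRECONDITION & SPEC =====
def Spec_classify_nse_announcement_py (description : String) (out : String) : Prop := out = classify_nse_announcement_py_alt description
instance (description : String) (out : String) : Decidable (Spec_classify_nse_announcement_py description out) := by unfold Spec_classify_nse_announcement_py; infer_instance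

-- ===== CLAIM (what is proved, stated in full; the proofs are below) =====
def Claim_equal_classify_nse_announcement_py : Prop := ∀ (description : String), Dom_classify_nse_announcement_py description → Spec_classify_nse_announcement_py description (classify_nse_announcement_py description)

-- ===== LEMMAS AND PROOFS =====

-- first group (from priority s on) containing a keyword satisfying p
def pvFirstIdx (p : String → Bool) : Int → List (String × List String) → Option Int
  | _, [] => none
  | s, g :: gs => if g.2.any p then some s else pvFirstIdx p (s + 1) gs

-- B's matched-priority list, generalized over the start priority
def pvMatched (p : String → Bool) (s : Int) (rules : List (String × List String)) : List Int :=
  (((PySem.List.enumerate rules s).flatMap (fun pr => pr.2.2.map (fun kw => (kw, pr.1)))).filter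
      (fun t => p t.1)).map (fun t => t.2)

def pvLabelOf (o : Option Int) : String :=
  match o with
  | some m =>
      match PySem.List.pyGet? pvLabels m with
      | some pr => pr.1
      | none => "OTHER"
  | none => "OTHER"

lemma pvMatched_nil (p : String → Bool) (s : Int) : pvMatched p s [] = [] := by
  simp [pvMatched, PySem.List.enumerate]

lemma pvMatched_cons (p : String → Bool) (s : Int) (g : String × List String)
    (gs : List (String × List String)) :
    pvMatched p s (g :: gs) = (g.2.filter p).map (fun _ => s) ++ pvMatched p (s + 1) gs := by
  simp [pvMatched, PySem.List.enumerate_cons, List.filter_map, List.map_map, Function.comp_def,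
    List.map_const']

lemma pvMatched_lb (p : String → Bool) (rules : List (String × List String)) :
    ∀ (s : Int), ∀ x ∈ pvMatched p s rules, s ≤ x := by
  induction rules with
  | nil => intro s x hx; simp [pvMatched_nil] at hx
  | cons g gs ih =>
      intro s x hx
      rw [pvMatched_cons] at hx
      rcases List.mem_append.mp hx with h | h
      · obtain ⟨_, _, rfl⟩ := List.mem_map.mp h; exact le_refl s
      · have := ih (s + 1) x h; omega

lemma pvFoldl_min_of_le (a : Int) (l : List Int) (h : ∀ x ∈ l, a ≤ x) :
    l.foldl min a = a := by
  induction l generalizing a with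
  | nil => rfl
  | cons x t ih =>
      simp only [List.foldl_cons, min_eq_left (h x (by simp))]
      exact ih a (fun y hy => h y (by simp [hy]))

lemma pvMin_matched (p : String → Bool) (rules : List (String × List String)) :
    ∀ (s : Int), PySem.List.min? (pvMatched p s rules) (fun x => x) = pvFirstIdx p s rules := by
  induction rules with
  | nil => intro s; simp [pvMatched_nil, pvFirstIdx, PySem.List.min?]
  | cons g gs ih =>
      intro s
      rw [pvMatched_cons, pvFirstIdx]
      by_cases h : g.2.any p = true
      · have hne : g.2.filter p ≠ [] := by
          obtain ⟨x, hx, hpx⟩ := List.any_eq_true.mp h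
          intro hnil
          exact (List.filter_eq_nil_iff.mp hnil x hx) hpx
        cases hc : g.2.filter p with
        | nil => exact absurd hc hne
        | cons a t =>
            simp only [List.map_cons, List.cons_append]
            rw [PySem.List.min?_id_cons]
            have hfold : (t.map (fun _ => s) ++ pvMatched p (s + 1) gs).foldl min s = s := by
              apply pvFoldl_min_of_le
              intro x hx
              rcases List.mem_append.mp hx with h1 | h1
              · obtain ⟨_, _, rfl⟩ := List.mem_map.mp h1; exact le_refl s
              · have := pvMatched_lb p gs (s + 1) x h1; omega
            rw [hfold, if_pos h]
      · have hfil : g.2.filter p = [] := by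
          apply List.filter_eq_nil_iff.mpr
          intro x hx hpx
          exact h (List.any_eq_true.mpr ⟨x, hx, hpx⟩)
        simp only [hfil, List.map_nil, List.nil_append, if_neg h]
        exact ih (s + 1)

lemma pvB_eq (d : String) :
    classify_nse_announcement_py_alt d
      = pvLabelOf (PySem.List.min?
          (pvMatched (fun w => PySem.Str.isIn w (PySem.Str.lower d)) 0 pvLabels) (fun x => x)) := by
  rfl

set_option maxHeartbeats 2000000 in
lemma pvA_eq (d : String) :
    classify_nse_announcement_py d
      = pvLabelOf (pvFirstIdx (fun w => PySem.Str.isIn w (PySem.Str.lower d)) 0 pvLabels) := by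
  unfold classify_nse_announcement_py pvLabels
  simp only [pvFirstIdx]
  split_ifs <;> rfl

-- ===== VERDICT (by name: the statement is the Claim_ definition above) =====
theorem classify_nse_announcement_py_spec : Claim_equal_classify_nse_announcement_py := by
  intro d _
  show classify_nse_announcement_py d = classify_nse_announcement_py_alt d
  rw [pvA_eq, pvB_eq, pvMin_matched]
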